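-- pv_equiv track=rewrite | github.com/kronenthaler/AdventOfCode | 2023/day21.py | part1
-- ===== SOURCE A (Python) =====
-- steps = [(-1, 0), (0, 1), (1, 0), (0, -1)]
--
-- def part1(board, start, target):
--     q = [(start, 0)]
--     visited = set()
--     even = set()
--     odds = set()
--     while len(q) > 0:
--         (i, j), current_step = q.pop(0)
--
--         if current_step > target:
--             break
--
--         if (i, j) in visited:
--             continue
--         visited.add((i, j))
--
--         for si, sj in steps:
--             ni, nj = i + si, j + sj
--             if ni < 0 or nj < 0 or ni >= len(board) or nj >= len(board[ni]):
--                 continue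
--             if board[ni][nj] == '#':
--                 continue
--
--             if (current_step + 1) % 2 == 0:
--                 even.add((ni, nj))
--             else:
--                 odds.add((ni, nj))
--             q.append(((ni, nj), current_step + 1))
--
--     return len(even)
-- ===== SOURCE B (Python) =====
-- def part1(board, start, target):
--     # Level-by-level frontier BFS: no queue, no per-cell pop; processes one whole
--     # distance layer at a time and collects even-parity neighbour layers.
--     frontier = {start}
--     seen = {start}
--     even = set()
--     d = 0
--     while frontier and d <= target:
--         nbrs = set()
--         for i, j in frontier:
--             for cand in ((i - 1, j), (i, j + 1), (i + 1, j), (i, j - 1)):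
--                 ni, nj = cand
--                 if 0 <= ni < len(board) and 0 <= nj < len(board[ni]) and board[ni][nj] != '#':
--                     nbrs.add(cand)
--         if (d + 1) % 2 == 0:
--             even |= nbrs
--         d += 1
--         frontier = nbrs - seen
--         seen |= nbrs
--     return len(even)
-- ===== Notes on version B (the rewrite author's own statement) =====
-- stated objective: alternative
-- what changed: Replaces the FIFO queue BFS (per-cell pop(0) with duplicate enqueues filtered by a visited check) by a level-by-level frontier BFS that expands one whole distance layer at a time as a set and unions the neighbour layers of odd depths into the even set.
import Mathlib
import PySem

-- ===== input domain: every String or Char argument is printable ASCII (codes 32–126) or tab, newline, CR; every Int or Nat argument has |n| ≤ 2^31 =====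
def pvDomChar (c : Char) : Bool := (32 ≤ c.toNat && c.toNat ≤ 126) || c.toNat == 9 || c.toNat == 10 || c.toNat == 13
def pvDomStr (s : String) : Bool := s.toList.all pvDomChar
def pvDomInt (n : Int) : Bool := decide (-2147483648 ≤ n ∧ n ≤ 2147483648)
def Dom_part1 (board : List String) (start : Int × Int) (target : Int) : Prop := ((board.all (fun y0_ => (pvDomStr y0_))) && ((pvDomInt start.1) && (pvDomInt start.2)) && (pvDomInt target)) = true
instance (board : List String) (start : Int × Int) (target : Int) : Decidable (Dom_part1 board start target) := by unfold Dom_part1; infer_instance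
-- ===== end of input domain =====

-- B replaces A's FIFO-queue BFS (pop(0) per cell, duplicate enqueues filtered by a
-- visited check) with a level-by-level frontier BFS over sets (an alternative
-- decomposition of the same search); the theorems below state value equality.

-- ===== PORT A =====
-- steps = [(-1, 0), (0, 1), (1, 0), (0, -1)]
def pvSteps : List (Int × Int) := [(-1, 0), (0, 1), (1, 0), (0, -1)]

-- len(board[ni]) — only consulted after 0 <= ni < len(board), where pyGet? is some
def pvRowLen (board : List String) (i : Int) : Int :=
  match PySem.List.pyGet? board i with
  | some r => PySem.Str.len r
  | none => 0

-- board[ni][nj] — only consulted in range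
def pvCharAt (board : List String) (i j : Int) : Option Char :=
  (PySem.List.pyGet? board i).bind fun r => PySem.Str.pyGet? r j

-- the body of A's `for si, sj in steps` loop, acting on the state (q, even, odds)
def pvStepA (board : List String) (i j currentStep : Int)
    (st : List ((Int × Int) × Int) × PySem.Set (Int × Int) × PySem.Set (Int × Int))
    (dir : Int × Int) :
    List ((Int × Int) × Int) × PySem.Set (Int × Int) × PySem.Set (Int × Int) :=
  let ni := i + dir.1
  let nj := j + dir.2
  if ni < 0 ∨ nj < 0 ∨ (board.length : Int) ≤ ni ∨ pvRowLen board ni ≤ nj then st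
  else if pvCharAt board ni nj = some '#' then st
  else if PySem.Int.mod (currentStep + 1) 2 = 0 then
    (st.1 ++ [((ni, nj), currentStep + 1)], PySem.Set.add st.2.1 (ni, nj), st.2.2)
  else
    (st.1 ++ [((ni, nj), currentStep + 1)], st.2.1, PySem.Set.add st.2.2 (ni, nj))

-- A's `while len(q) > 0` loop; the fuel is provably never exhausted (pvSim below)
def pvLoopA (board : List String) (target : Int) :
    Nat → List ((Int × Int) × Int) → PySem.Set (Int × Int) → PySem.Set (Int × Int) →
      PySem.Set (Int × Int) → Int
  | _, [], _, even, _ => PySem.Set.len even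
  | 0, _ :: _, _, even, _ => PySem.Set.len even
  | fuel + 1, ((i, j), currentStep) :: q, visited, even, odds =>
    if target < currentStep then PySem.Set.len even
    else if PySem.Set.contains visited (i, j) then pvLoopA board target fuel q visited even odds
    else
      let visited' := PySem.Set.add visited (i, j)
      let st := pvSteps.foldl (pvStepA board i j currentStep) (q, even, odds)
      pvLoopA board target fuel st.1 visited' st.2.1 st.2.2

-- all in-bounds cells, used only to size the (sufficient) fuel
def pvAllPos (board : List String) : List (Int × Int) :=
  (List.range board.length).flatMap
    (fun i : Nat =>
      (List.range ((board.getD i "").toList.length)).map (fun j : Nat => ((i : Int), (j : Int))))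

def part1 (board : List String) (start : Int × Int) (target : Int) : Int :=
  pvLoopA board target (4 * (pvAllPos board).length + 6) [(start, 0)]
    PySem.Set.empty PySem.Set.empty PySem.Set.empty

-- ===== PORT B =====
-- 0 <= ni < len(board) and 0 <= nj < len(board[ni]) and board[ni][nj] != '#'
def pvOpen (board : List String) (p : Int × Int) : Bool :=
  decide (0 ≤ p.1) && decide (p.1 < (board.length : Int)) && decide (0 ≤ p.2) &&
    decide (p.2 < pvRowLen board p.1) && !decide (pvCharAt board p.1 p.2 = some '#')

-- ((i - 1, j), (i, j + 1), (i + 1, j), (i, j - 1))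
def pvCand4 (p : Int × Int) : List (Int × Int) :=
  [(p.1 - 1, p.2), (p.1, p.2 + 1), (p.1 + 1, p.2), (p.1, p.2 - 1)]

-- body of B's `for i, j in frontier` loop: add each open candidate to nbrs
def pvGrow (board : List String) (acc : PySem.Set (Int × Int)) (c : Int × Int) :
    PySem.Set (Int × Int) :=
  (pvCand4 c).foldl (fun a n => if pvOpen board n then PySem.Set.add a n else a) acc

-- B's `while frontier and d <= target` loop; k counts the remaining iterations
-- with d <= target, i.e. k = (target + 1 - d).toNat along every call chain
def pvLoopB (board : List String) (target : Int) :
    Nat → PySem.Set (Int × Int) → PySem.Set (Int × Int) → PySem.Set (Int × Int) → Int → Int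
  | 0, _, _, even, _ => PySem.Set.len even
  | k + 1, frontier, seen, even, d =>
    if frontier = [] then PySem.Set.len even
    else
      let nbrs := frontier.foldl (pvGrow board) PySem.Set.empty
      let even' := if PySem.Int.mod (d + 1) 2 = 0 then PySem.Set.union even nbrs else even
      pvLoopB board target k (PySem.Set.diff nbrs seen) (PySem.Set.union seen nbrs) even' (d + 1)

def part1_alt (board : List String) (start : Int × Int) (target : Int) : Int :=
  pvLoopB board target (target + 1).toNat (PySem.Set.ofList [start]) (PySem.Set.ofList [start])
    PySem.Set.empty 0

-- ===== PRECONDITION & SPEC =====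
def Spec_part1 (board : List String) (start : Int × Int) (target : Int) (out : Int) : Prop := out = part1_alt board start target
instance (board : List String) (start : Int × Int) (target : Int) (out : Int) : Decidable (Spec_part1 board start target out) := by unfold Spec_part1; infer_instance

-- ===== CLAIM (what is proved, stated in full; the proofs are below) =====
def Claim_equal_part1 : Prop := ∀ (board : List String) (start : Int × Int) (target : Int), Dom_part1 board start target → Spec_part1 board start target (part1 board start target)

-- ===== LEMMAS AND PROOFS =====

-- proof-side view of B's inner loop: the open candidates, as a filtered list
-- proof-side view of B's inner loop: the open candidates, as a filtered list
def pvNbrs (board : List String) (p : Int × Int) : List (Int × Int) :=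
  (pvCand4 p).filter (pvOpen board)

-- the cells of A's level segment that will actually be processed (first
-- occurrences not yet visited), in queue order
def pvDedupF : List (Int × Int) → PySem.Set (Int × Int) → List (Int × Int)
  | [], _ => []
  | c :: F, V =>
    if PySem.Set.contains V c then pvDedupF F V else c :: pvDedupF F (PySem.Set.add V c)

-- B's computation resumed in the middle of a level: remaining frontier Frem,
-- neighbour accumulator nbrsAcc
def pvMidB (board : List String) (target : Int) (k : Nat) (d : Int)
    (Frem : List (Int × Int)) (nbrsAcc seen even : PySem.Set (Int × Int)) : Int :=
  let nbrs := Frem.foldl (pvGrow board) nbrsAcc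
  let even' := if PySem.Int.mod (d + 1) 2 = 0 then PySem.Set.union even nbrs else even
  pvLoopB board target k (PySem.Set.diff nbrs seen) (PySem.Set.union seen nbrs) even' (d + 1)

def pvCands (board : List String) (start : Int × Int) : List (Int × Int) :=
  start :: pvAllPos board

def pvFree (board : List String) (start : Int × Int) (V : PySem.Set (Int × Int)) : Nat :=
  ((pvCands board start).filter (fun p => !(PySem.Set.contains V p))).length

theorem pvGrowAux (board : List String) :
    ∀ (l : List (Int × Int)) (acc : PySem.Set (Int × Int)),
      l.foldl (fun a n => if pvOpen board n then PySem.Set.add a n else a) acc =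
        PySem.Set.update acc (l.filter (pvOpen board))
  | [], acc => by simp [PySem.Set.update_nil]
  | x :: l, acc => by
    by_cases h : pvOpen board x = true
    · simp only [List.foldl_cons, List.filter_cons, h, if_pos, PySem.Set.update_cons]
      exact pvGrowAux board l (PySem.Set.add acc x)
    · simp only [List.foldl_cons, List.filter_cons, h, Bool.false_eq_true, if_false]
      exact pvGrowAux board l acc

theorem pvGrow_eq (board : List String) (acc : PySem.Set (Int × Int)) (c : Int × Int) :
    pvGrow board acc c = PySem.Set.update acc (pvNbrs board c) :=
  pvGrowAux board (pvCand4 c) acc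

theorem pvOpen_iff (board : List String) (ni nj : Int) :
    pvOpen board (ni, nj) = true ↔
      ¬(ni < 0 ∨ nj < 0 ∨ (board.length : Int) ≤ ni ∨ pvRowLen board ni ≤ nj) ∧
        ¬(pvCharAt board ni nj = some '#') := by
  simp only [pvOpen, Bool.and_eq_true, decide_eq_true_eq, Bool.not_eq_true',
    decide_eq_false_iff_not]
  constructor
  · rintro ⟨⟨⟨⟨h1, h2⟩, h3⟩, h4⟩, h5⟩
    exact ⟨by push_neg; omega, h5⟩
  · rintro ⟨h, h5⟩
    push_neg at h
    exact ⟨⟨⟨⟨by omega, by omega⟩, by omega⟩, by omega⟩, h5⟩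

theorem pvStepA_not_open (board : List String) (i j s : Int)
    (st : List ((Int × Int) × Int) × PySem.Set (Int × Int) × PySem.Set (Int × Int))
    (dir : Int × Int) (h : pvOpen board (i + dir.1, j + dir.2) = false) :
    pvStepA board i j s st dir = st := by
  unfold pvStepA
  by_cases hb : i + dir.1 < 0 ∨ j + dir.2 < 0 ∨ (board.length : Int) ≤ i + dir.1 ∨
      pvRowLen board (i + dir.1) ≤ j + dir.2
  · simp [hb]
  · have hc : pvCharAt board (i + dir.1) (j + dir.2) = some '#' := by
      by_contra hcc
      have := (pvOpen_iff board (i + dir.1) (j + dir.2)).2 ⟨hb, hcc⟩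
      simp [this] at h
    simp [hb, hc]

theorem pvStepA_open (board : List String) (i j s : Int)
    (st : List ((Int × Int) × Int) × PySem.Set (Int × Int) × PySem.Set (Int × Int))
    (dir : Int × Int) (h : pvOpen board (i + dir.1, j + dir.2) = true) :
    pvStepA board i j s st dir =
      (st.1 ++ [((i + dir.1, j + dir.2), s + 1)],
       (if PySem.Int.mod (s + 1) 2 = 0 then PySem.Set.add st.2.1 (i + dir.1, j + dir.2) else st.2.1),
       (if PySem.Int.mod (s + 1) 2 = 0 then st.2.2 else PySem.Set.add st.2.2 (i + dir.1, j + dir.2))) := by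
  obtain ⟨hb, hc⟩ := (pvOpen_iff board (i + dir.1) (j + dir.2)).1 h
  unfold pvStepA
  rw [if_neg hb, if_neg hc]
  split_ifs with hp <;> rfl

theorem pvFoldAAux (board : List String) (i j s : Int) :
    ∀ (L : List (Int × Int)) (q : List ((Int × Int) × Int)) (even odds : PySem.Set (Int × Int)),
      L.foldl (pvStepA board i j s) (q, even, odds) =
        (q ++ (((L.map (fun dr => (i + dr.1, j + dr.2))).filter (pvOpen board)).map
            (fun n => (n, s + 1))),
         (if PySem.Int.mod (s + 1) 2 = 0 then
            PySem.Set.update even ((L.map (fun dr => (i + dr.1, j + dr.2))).filter (pvOpen board))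
          else even),
         (if PySem.Int.mod (s + 1) 2 = 0 then odds
          else PySem.Set.update odds ((L.map (fun dr => (i + dr.1, j + dr.2))).filter (pvOpen board))))
  | [], q, even, odds => by simp [PySem.Set.update_nil]
  | dr :: L, q, even, odds => by
    by_cases h : pvOpen board (i + dr.1, j + dr.2) = true
    · rw [List.foldl_cons, pvStepA_open board i j s (q, even, odds) dr h,
        pvFoldAAux board i j s L]
      simp only [List.map_cons, List.filter_cons, h, if_pos]
      split_ifs with hp <;> simp [PySem.Set.update_cons, List.append_assoc]
    · rw [List.foldl_cons, pvStepA_not_open board i j s (q, even, odds) dr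
        (by simpa using h)]
      rw [pvFoldAAux board i j s L]
      simp [h]

theorem pvNbrs_eq_mapFilter (board : List String) (i j : Int) :
    pvNbrs board (i, j) = (pvSteps.map (fun dr => (i + dr.1, j + dr.2))).filter (pvOpen board) := by
  simp [pvNbrs, pvCand4, pvSteps, sub_eq_add_neg]

theorem pvFoldA (board : List String) (i j s : Int) (q : List ((Int × Int) × Int))
    (even odds : PySem.Set (Int × Int)) :
    pvSteps.foldl (pvStepA board i j s) (q, even, odds) =
      (q ++ (pvNbrs board (i, j)).map (fun n => (n, s + 1)),
       (if PySem.Int.mod (s + 1) 2 = 0 then PySem.Set.update even (pvNbrs board (i, j)) else even),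
       (if PySem.Int.mod (s + 1) 2 = 0 then odds else PySem.Set.update odds (pvNbrs board (i, j)))) := by
  rw [pvFoldAAux board i j s pvSteps q even odds, pvNbrs_eq_mapFilter]

theorem pvUpdate_ofList (s : PySem.Set (Int × Int)) (xs : List (Int × Int)) :
    PySem.Set.update s (PySem.Set.ofList xs) = PySem.Set.update s xs := by
  rw [PySem.Set.update_eq_append_filter, PySem.Set.update_eq_append_filter,
    PySem.Set.ofList_ofList]

theorem pvDedupF_eq_filter (xs : List (Int × Int)) :
    ∀ (V : PySem.Set (Int × Int)),
      pvDedupF xs V = (PySem.Set.ofList xs).filter (fun x => !(PySem.Set.contains V x)) := by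
  induction xs with
  | nil => intro V; simp [pvDedupF]
  | cons c xs ih =>
    intro V
    rw [PySem.Set.ofList_cons]
    by_cases hc : PySem.Set.contains V c = true
    · have hcV : c ∈ V := (PySem.Set.contains_iff V c).1 hc
      simp only [pvDedupF, hc, if_pos, List.filter_cons, hc, Bool.not_true,
        Bool.false_eq_true, if_false]
      rw [ih V, PySem.Set.discard, List.filter_filter]
      apply List.filter_congr
      intro y _
      simp only [PySem.Set.contains_eq_listContains, List.contains_eq_mem]
      by_cases hy : y ∈ V
      · simp [hy]
      · simp [hy, show y ≠ c from fun he => hy (he ▸ hcV)]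
    · simp only [pvDedupF, hc, Bool.false_eq_true, if_false, List.filter_cons,
        Bool.not_eq_true', Bool.eq_false_iff.2 hc, Bool.not_false, if_pos]
      rw [ih (PySem.Set.add V c), PySem.Set.discard, List.filter_filter]
      congr 1
      apply List.filter_congr
      intro y _
      have hmem : (y ∈ PySem.Set.add V c) ↔ (y ∈ V ∨ y = c) := PySem.Set.mem_add V c y
      simp only [PySem.Set.contains_eq_listContains, List.contains_eq_mem]
      by_cases hy : y = c
      · subst hy
        simp [hmem]
      · simp [hy, hmem]

theorem pvMem_dedupF (xs : List (Int × Int)) (V : PySem.Set (Int × Int)) (x : Int × Int) :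
    x ∈ pvDedupF xs V ↔ x ∈ xs ∧ x ∉ V := by
  rw [pvDedupF_eq_filter]
  simp [List.mem_filter, PySem.Set.mem_ofList]

theorem pvDedupF_eq_diff (xs : List (Int × Int)) (V seen : PySem.Set (Int × Int))
    (h : ∀ y : Int × Int, y ∈ V ↔ y ∈ seen) :
    pvDedupF xs V = PySem.Set.diff (PySem.Set.ofList xs) seen := by
  rw [pvDedupF_eq_filter, PySem.Set.diff]
  apply List.filter_congr
  intro y _
  simp only [PySem.Set.contains_eq_listContains, List.contains_eq_mem]
  simp [h y]

theorem pvMem_allPos_of (board : List String) (i j : Nat) (hi : i < board.length)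
    (hj : j < (board.getD i "").toList.length) : ((i : Int), (j : Int)) ∈ pvAllPos board := by
  unfold pvAllPos
  refine List.mem_flatMap.2 ⟨i, List.mem_range.2 hi, ?_⟩
  exact List.mem_map_of_mem (List.mem_range.2 hj)

theorem pvOpen_mem_allPos (board : List String) (p : Int × Int)
    (h : pvOpen board p = true) : p ∈ pvAllPos board := by
  obtain ⟨pi, pj⟩ := p
  simp only [pvOpen, Bool.and_eq_true, decide_eq_true_eq] at h
  obtain ⟨⟨⟨⟨h1, h2⟩, h3⟩, h4⟩, -⟩ := h
  lift pi to Nat using h1 with i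
  lift pj to Nat using h3 with j
  have hi : i < board.length := by exact_mod_cast h2
  have hg : PySem.List.pyGet? board (i : Int) = some board[i] := by
    rw [PySem.List.pyGet?_natCast, List.getElem?_eq_getElem hi]
  have hrow : pvRowLen board (i : Int) = (board[i].toList.length : Int) := by
    unfold pvRowLen
    rw [hg]
    simp [PySem.Str.len]
  rw [hrow] at h4
  have hj : j < (board.getD i "").toList.length := by
    rw [List.getD_eq_getElem board "" hi]
    exact_mod_cast h4
  exact pvMem_allPos_of board i j hi hj

theorem pvFree_add_lt (board : List String) (start p : Int × Int)
    (V : PySem.Set (Int × Int)) (hc : p ∈ pvCands board start) (hv : p ∉ V) :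
    pvFree board start (PySem.Set.add V p) < pvFree board start V := by
  unfold pvFree
  have hpt : ∀ q : Int × Int,
      (!(PySem.Set.contains (PySem.Set.add V p) q)) =
        ((!(PySem.Set.contains V q)) && !(q == p)) := by
    intro q
    have hmem : (q ∈ PySem.Set.add V p) ↔ (q ∈ V ∨ q = p) := PySem.Set.mem_add V p q
    simp only [PySem.Set.contains_eq_listContains, List.contains_eq_mem]
    by_cases h1 : q ∈ V <;> by_cases h2 : q = p <;> simp [h1, h2, hmem]
  rw [List.filter_congr (fun q _ => hpt q)]
  rw [show (fun q : Int × Int => (!(PySem.Set.contains V q)) && !(q == p)) =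
      (fun q : Int × Int => (!(q == p)) && !(PySem.Set.contains V q)) from
    funext fun q => Bool.and_comm _ _]
  rw [← List.filter_filter]
  apply List.length_filter_lt_length_iff_exists.2
  refine ⟨p, List.mem_filter.2 ⟨hc, ?_⟩, by simp⟩
  simp only [PySem.Set.contains_eq_listContains, List.contains_eq_mem]
  simpa using hv

theorem pvLoopA_nilq (board : List String) (target : Int) (fuel : Nat)
    (V even odds : PySem.Set (Int × Int)) :
    pvLoopA board target fuel [] V even odds = PySem.Set.len even := by
  cases fuel <;> rfl

theorem pvLoopA_skip (board : List String) (target : Int) (e : Int)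
    (V even odds : PySem.Set (Int × Int)) :
    ∀ (L : List (Int × Int)) (fuel : Nat), L.length < fuel → (∀ p ∈ L, p ∈ V) →
      pvLoopA board target fuel (L.map (fun p => (p, e))) V even odds = PySem.Set.len even := by
  intro L
  induction L with
  | nil => intro fuel _ _; exact pvLoopA_nilq board target fuel V even odds
  | cons p L ih =>
    intro fuel hlen hmem
    obtain ⟨i, j⟩ := p
    obtain ⟨fuel, rfl⟩ : ∃ f, fuel = f + 1 := ⟨fuel - 1, by omega⟩
    show pvLoopA board target (fuel + 1) (((i, j), e) :: L.map (fun p => (p, e))) V even odds = _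
    rw [pvLoopA]
    have hctn : PySem.Set.contains V (i, j) = true :=
      (PySem.Set.contains_iff V (i, j)).2 (hmem (i, j) List.mem_cons_self)
    by_cases ht : target < e
    · rw [if_pos ht]
    · rw [if_neg ht, if_pos hctn]
      exact ih fuel (by simp at hlen ⊢; omega)
        (fun q hq => hmem q (List.mem_cons_of_mem _ hq))

theorem pvLoopB_nil (board : List String) (target : Int) (k : Nat) (d : Int)
    (seen even : PySem.Set (Int × Int)) :
    pvLoopB board target k [] seen even d = PySem.Set.len even := by
  cases k <;> simp [pvLoopB]

theorem pvUnfoldB (board : List String) (target : Int) (k : Nat) (d : Int)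
    (frontier seen even : PySem.Set (Int × Int)) (h : frontier ≠ []) :
    pvLoopB board target (k + 1) frontier seen even d =
      pvMidB board target k d frontier PySem.Set.empty seen even := by
  simp [pvLoopB, pvMidB, h]

theorem pvMidB_cons (board : List String) (target : Int) (k : Nat) (d : Int)
    (c : Int × Int) (rest : List (Int × Int)) (acc seen even : PySem.Set (Int × Int)) :
    pvMidB board target k d (c :: rest) acc seen even =
      pvMidB board target k d rest (pvGrow board acc c) seen even := rfl

theorem pvSim (board : List String) (start : Int × Int) (target : Int) :
    ∀ (n fuel : Nat) (F NX : List (Int × Int)) (V seen even odds : PySem.Set (Int × Int)) (d : Int),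
      2 * fuel + (if F = [] then 1 else 0) ≤ n →
      F.length + NX.length + 4 * pvFree board start V < fuel →
      (∀ p ∈ F, p ∈ pvCands board start) →
      (∀ p ∈ NX, p ∈ pvCands board start) →
      d ≤ target →
      (∀ x : Int × Int, (x ∈ V ∨ x ∈ pvDedupF F V) ↔ x ∈ seen) →
      pvLoopA board target fuel
          (F.map (fun p => (p, d)) ++ NX.map (fun p => (p, d + 1))) V
          (if PySem.Int.mod (d + 1) 2 = 0 then PySem.Set.update even NX else even) odds =
        pvMidB board target (target - d).toNat d (pvDedupF F V) (PySem.Set.ofList NX) seen even := by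
  intro n
  induction n with
  | zero =>
    intro fuel F NX V seen even odds d hn hfuel _ _ _ _
    omega
  | succ n ih =>
    intro fuel F NX V seen even odds d hn hfuel hCF hCN hd hseen
    cases F with
    | nil =>
      have hseenV : ∀ x : Int × Int, x ∈ V ↔ x ∈ seen := by
        intro x
        have := hseen x
        simpa [pvDedupF] using this
      cases NX with
      | nil =>
        simp only [List.map_nil, List.nil_append]
        rw [pvLoopA_nilq]
        show _ = pvMidB board target _ d (pvDedupF [] V) (PySem.Set.ofList []) seen even
        rw [pvMidB]
        simp only [pvDedupF, List.foldl_nil]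
        rw [show PySem.Set.ofList ([] : List (Int × Int)) = [] from rfl]
        rw [show PySem.Set.diff ([] : PySem.Set (Int × Int)) seen = [] from rfl]
        rw [pvLoopB_nil]
        rw [show PySem.Set.union even ([] : PySem.Set (Int × Int)) = even from
          PySem.Set.update_nil even]
        rw [PySem.Set.update_nil]
      | cons c NX' =>
        have hE : (if PySem.Int.mod (d + 1) 2 = 0 then PySem.Set.update even (c :: NX') else even)
            = (if PySem.Int.mod (d + 1) 2 = 0 then
                PySem.Set.union even (PySem.Set.ofList (c :: NX')) else even) := by
          rw [PySem.Set.union, pvUpdate_ofList]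
        have hmid : pvMidB board target (target - d).toNat d (pvDedupF [] V)
              (PySem.Set.ofList (c :: NX')) seen even =
            pvLoopB board target (target - d).toNat
              (PySem.Set.diff (PySem.Set.ofList (c :: NX')) seen)
              (PySem.Set.union seen (PySem.Set.ofList (c :: NX')))
              (if PySem.Int.mod (d + 1) 2 = 0 then
                PySem.Set.union even (PySem.Set.ofList (c :: NX')) else even) (d + 1) := rfl
        rw [hmid, ← hE]
        by_cases hk : d = target
        · rw [show (target - d).toNat = 0 from by omega]
          obtain ⟨f, rfl⟩ : ∃ f, fuel = f + 1 := ⟨fuel - 1, by omega⟩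
          simp only [List.map_cons, List.map_nil, List.nil_append, List.cons_append]
          rw [pvLoopA, if_pos (by omega : target < d + 1)]
          rw [pvLoopB]
        · have hdlt : d < target := lt_of_le_of_ne hd hk
          have hfr : pvDedupF (c :: NX') V =
              PySem.Set.diff (PySem.Set.ofList (c :: NX')) seen :=
            pvDedupF_eq_diff _ V seen hseenV
          by_cases hfe : PySem.Set.diff (PySem.Set.ofList (c :: NX')) seen = []
          · have hall : ∀ p ∈ (c :: NX'), p ∈ V := by
              intro p hp
              by_contra hpv
              have hm : p ∈ pvDedupF (c :: NX') V := (pvMem_dedupF _ V p).2 ⟨hp, hpv⟩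
              rw [hfr, hfe] at hm
              simp at hm
            simp only [List.map_nil, List.nil_append]
            rw [pvLoopA_skip board target (d + 1) V _ odds (c :: NX') fuel
              (by simp at hfuel ⊢; omega) hall]
            rw [hfe, pvLoopB_nil]
          · obtain ⟨k', hk'⟩ : ∃ k', (target - d).toNat = k' + 1 :=
              ⟨(target - d).toNat - 1, by omega⟩
            rw [hk', pvUnfoldB board target k' (d + 1) _ _ _ hfe]
            have hih := ih fuel (c :: NX') [] V
              (PySem.Set.union seen (PySem.Set.ofList (c :: NX')))
              (if PySem.Int.mod (d + 1) 2 = 0 then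
                PySem.Set.update even (c :: NX') else even) odds (d + 1)
              (by simp at hn ⊢; omega)
              (by simp at hfuel ⊢; omega)
              hCN (by simp) (by omega)
              (by
                intro x
                have h1 := hseenV x
                have h2 : x ∈ pvDedupF (c :: NX') V ↔ x ∈ (c :: NX') ∧ x ∉ V :=
                  pvMem_dedupF _ V x
                have h3 : x ∈ PySem.Set.union seen (PySem.Set.ofList (c :: NX')) ↔
                    x ∈ seen ∨ x ∈ (c :: NX') := by
                  rw [PySem.Set.mem_union]
                  simp [PySem.Set.mem_ofList]
                rw [h2, h3, ← h1]
                by_cases hx : x ∈ V <;> simp [hx])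
            simp only [List.map_nil, List.append_nil, PySem.Set.update_nil, ite_self] at hih
            simp only [List.map_nil, List.nil_append]
            rw [hih]
            have hk2 : (target - (d + 1)).toNat = k' := by omega
            rw [hk2]
            rw [show PySem.Set.ofList ([] : List (Int × Int)) = PySem.Set.empty from rfl]
            rw [hfr]
    | cons c F' =>
      obtain ⟨ci, cj⟩ := c
      obtain ⟨f, rfl⟩ : ∃ f, fuel = f + 1 := ⟨fuel - 1, by omega⟩
      simp only [List.map_cons, List.cons_append]
      rw [pvLoopA, if_neg (by omega : ¬ target < d)]
      by_cases hcv : PySem.Set.contains V (ci, cj) = true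
      · rw [if_pos hcv]
        have hdf : pvDedupF ((ci, cj) :: F') V = pvDedupF F' V := by
          simp only [pvDedupF]
          rw [if_pos hcv]
        rw [hdf] at hseen ⊢
        exact ih f F' NX V seen even odds d (by simp at hn; split_ifs <;> omega)
          (by simp at hfuel ⊢; omega)
          (fun p hp => hCF p (List.mem_cons_of_mem _ hp)) hCN hd hseen
      · rw [if_neg hcv]
        have hcm : (ci, cj) ∉ V := fun hm => hcv ((PySem.Set.contains_iff V _).2 hm)
        rw [pvFoldA]
        have hnb4 : (pvNbrs board (ci, cj)).length ≤ 4 := List.length_filter_le _ _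
        have hfree := pvFree_add_lt board start (ci, cj) V
          (hCF _ List.mem_cons_self) hcm
        have hih := ih f F' (NX ++ pvNbrs board (ci, cj)) (PySem.Set.add V (ci, cj))
          seen even
          (if PySem.Int.mod (d + 1) 2 = 0 then odds
           else PySem.Set.update odds (pvNbrs board (ci, cj))) d
          (by simp at hn ⊢; split_ifs <;> omega)
          (by simp at hfuel ⊢; omega)
          (fun p hp => hCF p (List.mem_cons_of_mem _ hp))
          (by
            intro p hp
            rcases List.mem_append.1 hp with h | h
            · exact hCN p h
            · exact List.mem_cons_of_mem _
                (pvOpen_mem_allPos board p (List.of_mem_filter h)))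
          hd
          (by
            intro x
            have h0 := hseen x
            have hdf : pvDedupF ((ci, cj) :: F') V =
                (ci, cj) :: pvDedupF F' (PySem.Set.add V (ci, cj)) := by
              simp only [pvDedupF]
              rw [if_neg hcv]
            rw [hdf] at h0
            have hma : (x ∈ PySem.Set.add V (ci, cj)) ↔ (x ∈ V ∨ x = (ci, cj)) :=
              PySem.Set.mem_add V (ci, cj) x
            rw [← h0, hma]
            simp only [List.mem_cons]
            tauto)
        have hq : (F'.map (fun p => (p, d)) ++ NX.map (fun p => (p, d + 1))) ++
              (pvNbrs board (ci, cj)).map (fun n => (n, d + 1)) =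
            F'.map (fun p => (p, d)) ++
              (NX ++ pvNbrs board (ci, cj)).map (fun p => (p, d + 1)) := by
          rw [List.map_append, List.append_assoc]
        rw [hq]
        have hEE : (if PySem.Int.mod (d + 1) 2 = 0 then
              PySem.Set.update (if PySem.Int.mod (d + 1) 2 = 0 then
                PySem.Set.update even NX else even) (pvNbrs board (ci, cj))
            else (if PySem.Int.mod (d + 1) 2 = 0 then PySem.Set.update even NX else even)) =
            (if PySem.Int.mod (d + 1) 2 = 0 then
              PySem.Set.update even (NX ++ pvNbrs board (ci, cj)) else even) := by
          split_ifs with hp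
          · rw [PySem.Set.update_append]
          · rfl
        dsimp only
        rw [hEE, hih]
        have hdf2 : pvDedupF ((ci, cj) :: F') V =
            (ci, cj) :: pvDedupF F' (PySem.Set.add V (ci, cj)) := by
          simp only [pvDedupF]
          rw [if_neg hcv]
        rw [hdf2, pvMidB_cons, pvGrow_eq, ← PySem.Set.ofList_append]

theorem part1_eq_alt (board : List String) (start : Int × Int) (target : Int) :
    part1 board start target = part1_alt board start target := by
  obtain ⟨si, sj⟩ := start
  by_cases ht : target < 0
  · unfold part1 part1_alt
    obtain ⟨f, hf⟩ : ∃ f, 4 * (pvAllPos board).length + 6 = f + 1 := ⟨4 * (pvAllPos board).length + 5, by omega⟩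
    rw [hf, pvLoopA, if_pos (by omega : target < 0)]
    rw [show (target + 1).toNat = 0 from by omega, pvLoopB]
  · have ht0 : (0 : Int) ≤ target := by omega
    unfold part1 part1_alt
    have hof : PySem.Set.ofList [((si, sj) : Int × Int)] = [(si, sj)] := rfl
    rw [show (target + 1).toNat = (target - 0).toNat + 1 from by omega]
    rw [pvUnfoldB board target ((target - 0).toNat) 0 _ _ _ (by rw [hof]; simp)]
    have hdd : pvDedupF [((si, sj) : Int × Int)] PySem.Set.empty = [(si, sj)] := rfl
    have hsim := pvSim board (si, sj) target (2 * (4 * (pvAllPos board).length + 6))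
      (4 * (pvAllPos board).length + 6) [(si, sj)] [] PySem.Set.empty
      (PySem.Set.ofList [(si, sj)]) PySem.Set.empty PySem.Set.empty 0
      (by simp)
      (by
        have : pvFree board (si, sj) PySem.Set.empty ≤ (pvCands board (si, sj)).length :=
          List.length_filter_le _ _
        have h2 : (pvCands board (si, sj)).length = (pvAllPos board).length + 1 := by
          simp [pvCands]
        simp only [List.length_cons, List.length_nil]
        omega)
      (by intro p hp; simp at hp; simp [hp, pvCands])
      (by intro p hp; simp at hp)
      ht0
      (by
        intro x
        rw [hdd, hof]
        simp [PySem.Set.empty])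
    simp only [List.map_cons, List.map_nil, List.nil_append, List.append_nil,
      PySem.Set.update_nil, ite_self] at hsim
    rw [hdd, hof] at hsim
    exact hsim

-- ===== VERDICT (by name: the statement is the Claim_ definition above) =====
theorem part1_spec : Claim_equal_part1 := by
  unfold Claim_equal_part1
  intro board start target _
  unfold Spec_part1
  exact part1_eq_alt board start target
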